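-- pv_equiv track=rewrite | github.com/rebuilder945/FL_research | ast_research/python_code_5.23/page6/success_code/殷煜景-4028-2023-11-03_19_14_36.py | huiwen
-- ===== SOURCE A (Python) =====
-- def huiwen(z):
--     m=[]
--     for x in range(z):
--         p=str(x)
--         q=p[::-1]
--         if p==q:
--             m.append(x)
--     return set(m)
-- ===== SOURCE B (Python) =====
-- def _is_pal(s):
--     # in-place two-pointer scan: no reversed copy, early exit on first mismatch
--     i, j = 0, len(s) - 1
--     while i < j:
--         if s[i] != s[j]:
--             return False
--         i += 1
--         j -= 1
--     return True
--
--
-- def huiwen(z):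
--     return {x for x in range(z) if _is_pal(str(x))}
-- ===== Notes on version B (the rewrite author's own statement) =====
-- stated objective: alternative
-- what changed: B tests palindromicity with an in-place two-pointer scan (compare s[i] with s[j] moving inward, early exit) instead of building the reversed string and comparing whole strings, and collects results with a set comprehension instead of an appended list converted to a set.
import Mathlib
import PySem

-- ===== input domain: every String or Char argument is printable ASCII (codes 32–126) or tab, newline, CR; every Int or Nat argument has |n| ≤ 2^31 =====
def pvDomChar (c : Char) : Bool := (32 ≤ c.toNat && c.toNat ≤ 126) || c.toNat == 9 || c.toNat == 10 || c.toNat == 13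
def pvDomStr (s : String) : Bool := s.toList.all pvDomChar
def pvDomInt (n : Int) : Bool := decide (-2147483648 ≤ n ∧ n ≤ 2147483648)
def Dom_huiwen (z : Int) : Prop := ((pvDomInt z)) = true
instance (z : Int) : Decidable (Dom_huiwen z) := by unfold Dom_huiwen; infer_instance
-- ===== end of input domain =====

-- B replaces A's reversed-copy string comparison by an in-place two-pointer palindrome scan
-- with early exit and a set comprehension (alternative decomposition, same asymptotic cost).

-- ===== PORT A =====
def huiwen (z : Int) : List Int :=
  let m := (PySem.List.pyRange 0 z 1).foldl (fun m x =>
    let p := PySem.Int.toStr x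
    -- q = p[::-1]; step -1 never raises, so slice? is always `some`
    let q := (PySem.Str.slice? p none none (-1)).getD ""
    if p == q then m ++ [x] else m) []
  PySem.Set.ofList m

-- ===== PORT B =====
-- two-pointer while-loop of _is_pal; indices stay in range, pyGet? models s[i]
def pvPalLoop (cs : List Char) (i j : Int) : Bool :=
  if i < j then
    if PySem.List.pyGet? cs i ≠ PySem.List.pyGet? cs j then false
    else pvPalLoop cs (i + 1) (j - 1)
  else true
termination_by (j - i).toNat
decreasing_by omega

def pvIsPal (s : String) : Bool := pvPalLoop s.toList 0 ((s.toList.length : Int) - 1)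

def huiwen_alt (z : Int) : List Int :=
  PySem.Set.ofList
    ((PySem.List.pyRange 0 z 1).filter (fun x => pvIsPal (PySem.Int.toStr x)))

-- ===== PRECONDITION & SPEC =====
def Spec_huiwen (z : Int) (out : List Int) : Prop := out = huiwen_alt z
instance (z : Int) (out : List Int) : Decidable (Spec_huiwen z out) := by unfold Spec_huiwen; infer_instance

-- ===== CLAIM (what is proved, stated in full; the proofs are below) =====
def Claim_equal_huiwen : Prop := ∀ (z : Int), Dom_huiwen z → Spec_huiwen z (huiwen z)

-- ===== LEMMAS AND PROOFS =====

theorem pvPalLoop_iff (cs : List Char) (i j : Int) (hi : 0 ≤ i) (hj : j < cs.length) :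
    pvPalLoop cs i j = true ↔
      ∀ k : Int, i ≤ k → k ≤ j → cs[k.toNat]? = cs[(i + j - k).toNat]? := by
  unfold pvPalLoop
  by_cases h : i < j
  · have hilen : i.toNat < cs.length := by omega
    have hjlen : j.toNat < cs.length := by omega
    rw [if_pos h]
    rw [PySem.List.pyGet?_of_nonneg cs hi, PySem.List.pyGet?_of_nonneg cs (i := j) (by omega)]
    by_cases hne : cs[i.toNat]? ≠ cs[j.toNat]?
    · rw [if_pos hne]
      refine iff_of_false (by simp) ?_
      intro hall
      have := hall i le_rfl (le_of_lt h)
      have hij : (i + j - i).toNat = j.toNat := by omega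
      rw [hij] at this
      exact hne this
    · rw [if_neg hne]
      rw [not_ne_iff] at hne
      rw [pvPalLoop_iff cs (i + 1) (j - 1) (by omega) (by omega)]
      constructor
      · intro hall k hik hkj
        rcases eq_or_lt_of_le hik with hki | hki
        · subst hki
          have harith : (i + j - i).toNat = j.toNat := by omega
          rw [harith]
          exact hne
        · rcases eq_or_lt_of_le hkj with hkj' | hkj'
          · have h1 : k.toNat = j.toNat := by omega
            have h2 : (i + j - k).toNat = i.toNat := by omega
            rw [h1, h2]; exact hne.symm
          · have := hall k (by omega) (by omega)
            have harith : (i + 1) + (j - 1) - k = i + j - k := by omega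
            rwa [harith] at this
      · intro hall k hik hkj
        have := hall k (by omega) (by omega)
        have harith : (i + 1) + (j - 1) - k = i + j - k := by omega
        rwa [harith]
  · rw [if_neg h]
    simp only [true_iff]
    intro k hik hkj
    have hk : k = i := by omega
    have : (i + j - k).toNat = k.toNat := by omega
    rw [this]
termination_by (j - i).toNat
decreasing_by omega

theorem pvPalLoop_eq_reverse (cs : List Char) :
    pvPalLoop cs 0 ((cs.length : Int) - 1) = decide (cs = cs.reverse) := by
  rcases Nat.eq_zero_or_pos cs.length with h0 | hpos
  · have : cs = [] := List.length_eq_zero_iff.mp h0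
    subst this
    simp [pvPalLoop]
  · have hiff := pvPalLoop_iff cs 0 ((cs.length : Int) - 1) le_rfl (by omega)
    have hmain : cs = cs.reverse ↔
        (∀ k : Int, 0 ≤ k → k ≤ (cs.length : Int) - 1 →
          cs[k.toNat]? = cs[(0 + ((cs.length : Int) - 1) - k).toNat]?) := by
      constructor
      · intro heq k hk0 hk1
        have hk : k.toNat < cs.length := by omega
        have := List.getElem?_reverse (l := cs) hk
        rw [← heq] at this
        have harith : (0 + ((cs.length : Int) - 1) - k).toNat = cs.length - 1 - k.toNat := by omega
        rw [harith, ← this]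
      · intro hall
        have hlen : cs.reverse.length = cs.length := List.length_reverse
        apply List.ext_getElem?
        intro n
        by_cases hn : n < cs.length
        · have := hall (n : Int) (by omega) (by omega)
          have harith : (0 + ((cs.length : Int) - 1) - (n : Int)).toNat = cs.length - 1 - n := by omega
          have hnn : ((n : Int)).toNat = n := by omega
          rw [hnn, harith] at this
          rw [this, List.getElem?_reverse hn]
        · rw [List.getElem?_eq_none (by omega), List.getElem?_eq_none (by omega)]
    have key : pvPalLoop cs 0 ((cs.length : Int) - 1) = true ↔ cs = cs.reverse :=
      hiff.trans hmain.symm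
    cases hb : pvPalLoop cs 0 ((cs.length : Int) - 1) with
    | true => exact (decide_eq_true (key.mp hb)).symm
    | false =>
        have hne : ¬ cs = cs.reverse := fun hc => by
          have := key.mpr hc
          rw [hb] at this
          exact Bool.false_ne_true this
        exact (decide_eq_false hne).symm

-- the two per-element tests agree on every integer
theorem test_eq (x : Int) :
    (PySem.Int.toStr x == (PySem.Str.slice? (PySem.Int.toStr x) none none (-1)).getD "")
      = pvIsPal (PySem.Int.toStr x) := by
  set p := PySem.Int.toStr x with hp
  rw [PySem.Str.slice?_none_none_neg_one]
  unfold pvIsPal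
  rw [pvPalLoop_eq_reverse]
  show (p == String.ofList p.toList.reverse) = decide (p.toList = p.toList.reverse)
  by_cases h : p.toList = p.toList.reverse
  · have hps : p = String.ofList p.toList.reverse :=
      String.toList_inj.mp (by simpa using h)
    rw [← hps, decide_eq_true h]
    simp
  · have hps : p ≠ String.ofList p.toList.reverse := fun hc =>
      h (by simpa using congrArg String.toList hc)
    rw [decide_eq_false h]
    exact beq_eq_false_iff_ne.mpr hps

theorem huiwen_eq (z : Int) : huiwen z = huiwen_alt z := by
  show PySem.Set.ofList
      ((PySem.List.pyRange 0 z 1).foldl (fun m x =>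
        if (PySem.Int.toStr x ==
            (PySem.Str.slice? (PySem.Int.toStr x) none none (-1)).getD "") then m ++ [x] else m)
        []) =
    PySem.Set.ofList
      ((PySem.List.pyRange 0 z 1).filter (fun x => pvIsPal (PySem.Int.toStr x)))
  rw [PySem.List.foldl_append_if_eq_filter
      (fun x => (PySem.Int.toStr x ==
        (PySem.Str.slice? (PySem.Int.toStr x) none none (-1)).getD ""))]
  rw [List.nil_append]
  exact congrArg PySem.Set.ofList (List.filter_congr (fun x _ => test_eq x))

-- ===== VERDICT (by name: the statement is the Claim_ definition above) =====
theorem huiwen_spec : Claim_equal_huiwen := by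
  intro z _
  unfold Spec_huiwen
  exact huiwen_eq z
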